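-- pv_equiv track=rewrite | github.com/Basit-CREST/Training-Crest | 02-Python Practice/W3resource/01-Python Programming Puzzle/01-Q_98.py | get_parentheses_depths
-- ===== SOURCE A (Python) =====
-- def get_parentheses_depths(groups_string):
--     groups = groups_string.split()
--     depths = []
--
--     for group in groups:
--         count = 0
--         max_depth = 0
--         for char in group:
--             if char == '(':
--                 count += 1
--                 max_depth = max(max_depth, count)
--             elif char == ')':
--                 count -= 1
--         depths.append(max_depth)
--
--     return depths
-- ===== SOURCE B (Python) =====
-- def get_parentheses_depths(groups_string):
--     depths = []
--     count = 0
--     in_group = False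
--     for ch in groups_string:
--         if ch.isspace():
--             in_group = False
--         else:
--             if not in_group:
--                 in_group = True
--                 count = 0
--                 depths.append(0)
--             if ch == '(':
--                 count += 1
--                 depths[-1] = max(depths[-1], count)
--             elif ch == ')':
--                 count -= 1
--     return depths
-- ===== Notes on version B (the rewrite author's own statement) =====
-- stated objective: alternative
-- what changed: B drops the split()-then-nested-loop structure entirely: it makes a single linear scan over the raw string, detecting word boundaries with isspace() itself and updating the last element of the result list in place, so no intermediate list of groups is ever built.
import Mathlib
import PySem

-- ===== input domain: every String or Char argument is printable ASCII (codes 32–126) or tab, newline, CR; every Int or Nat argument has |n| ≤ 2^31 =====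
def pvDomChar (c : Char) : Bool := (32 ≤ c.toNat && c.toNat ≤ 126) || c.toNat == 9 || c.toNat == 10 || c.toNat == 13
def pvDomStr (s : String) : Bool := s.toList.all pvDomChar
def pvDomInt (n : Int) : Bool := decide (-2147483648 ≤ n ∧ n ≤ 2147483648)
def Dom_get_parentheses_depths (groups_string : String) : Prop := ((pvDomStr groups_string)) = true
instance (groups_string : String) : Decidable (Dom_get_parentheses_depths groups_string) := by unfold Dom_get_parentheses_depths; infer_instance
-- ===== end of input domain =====

-- B replaces A's split()-into-groups + nested per-group loop by one single linear scan over the raw string, detecting word boundaries itself and updating the last result entry in place (alternative decomposition, same cost).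


-- ===== PORT A =====
-- A's inner-loop body: state (count, max_depth), branches in A's order
def pvStepA (st : Int × Int) (char : Char) : Int × Int :=
  if char = '(' then (st.1 + 1, max st.2 (st.1 + 1))
  else if char = ')' then (st.1 - 1, st.2)
  else st

def get_parentheses_depths (groups_string : String) : List Int :=
  let groups := PySem.Str.split₀ groups_string
  groups.foldl (fun depths group =>
    depths ++ [(group.toList.foldl pvStepA ((0 : Int), (0 : Int))).2]) []

-- ===== PORT B =====
-- depths[-1] = max(depths[-1], count): rewrite the last element of the list
def pvUpdLast (f : Int → Int) : List Int → List Int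
  | [] => []
  | [x] => [f x]
  | x :: xs => x :: pvUpdLast f xs

-- B's loop body: state (depths, count, in_group)
def pvStepB (st : List Int × Int × Bool) (ch : Char) : List Int × Int × Bool :=
  if PySem.Chars.isspace ch then (st.1, st.2.1, false)
  else
    let st := if st.2.2 then st else (st.1 ++ [(0 : Int)], (0 : Int), true)
    if ch = '(' then (pvUpdLast (fun d => max d (st.2.1 + 1)) st.1, st.2.1 + 1, st.2.2)
    else if ch = ')' then (st.1, st.2.1 - 1, st.2.2)
    else st

def get_parentheses_depths_alt (groups_string : String) : List Int :=
  (groups_string.toList.foldl pvStepB ([], 0, false)).1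

-- ===== PRECONDITION & SPEC =====
def Spec_get_parentheses_depths (groups_string : String) (out : List Int) : Prop := out = get_parentheses_depths_alt groups_string
instance (groups_string : String) (out : List Int) : Decidable (Spec_get_parentheses_depths groups_string out) := by unfold Spec_get_parentheses_depths; infer_instance

-- ===== CLAIM (what is proved, stated in full; the proofs are below) =====
def Claim_equal_get_parentheses_depths : Prop := ∀ (groups_string : String), Dom_get_parentheses_depths groups_string → Spec_get_parentheses_depths groups_string (get_parentheses_depths groups_string)

-- ===== LEMMAS AND PROOFS =====

-- reference tokenizer: what split() produces, stated structurally
def pvToks : List Char → List (List Char)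
  | [] => []
  | c :: rest =>
    if PySem.Chars.isspace c then pvToks rest
    else (c :: rest.takeWhile (fun x => !PySem.Chars.isspace x))
           :: pvToks (rest.dropWhile (fun x => !PySem.Chars.isspace x))
termination_by cs => cs.length
decreasing_by
  · simp
  · have := List.length_dropWhile_le (fun x => !PySem.Chars.isspace x) rest
    simp
    omega

theorem pvGo_eq (cs : List Char) : ∀ (cur : List Char) (acc : List (List Char)),
    PySem.Chars.split₀.go cs cur acc
      = acc.reverse ++ (if cur = [] then pvToks cs
          else (cur.reverse ++ cs.takeWhile (fun x => !PySem.Chars.isspace x))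
                 :: pvToks (cs.dropWhile (fun x => !PySem.Chars.isspace x))) := by
  induction cs with
  | nil =>
    intro cur acc
    by_cases h : cur = [] <;> simp [PySem.Chars.split₀.go, h, pvToks, List.isEmpty_iff]
  | cons c rest ih =>
    intro cur acc
    by_cases hs : PySem.Chars.isspace c
    · by_cases h : cur = []
      · subst h
        simp [PySem.Chars.split₀.go, hs, ih, pvToks]
      · simp [PySem.Chars.split₀.go, hs, List.isEmpty_iff, h, ih, pvToks]
    · by_cases h : cur = []
      · subst h
        simp [PySem.Chars.split₀.go, hs, ih, pvToks]
      · simp [PySem.Chars.split₀.go, hs, ih, h]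

theorem pvSplit_eq_toks (cs : List Char) : PySem.Chars.split₀ cs = pvToks cs := by
  have := pvGo_eq cs [] []
  simpa [PySem.Chars.split₀] using this

-- per-group result of A's inner loop
def pvPeak (g : List Char) : Int := (g.foldl pvStepA ((0 : Int), (0 : Int))).2

theorem pvUpdLast_append (f : Int → Int) (d : List Int) (x : Int) :
    pvUpdLast f (d ++ [x]) = d ++ [f x] := by
  induction d with
  | nil => simp [pvUpdLast]
  | cons a t ih =>
    cases t with
    | nil => simp [pvUpdLast] at ih ⊢
    | cons b bs => simpa [pvUpdLast] using ih

-- a whitespace step only clears in_group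
theorem pvStepB_space (ch : Char) (hs : PySem.Chars.isspace ch = true)
    (st : List Int × Int × Bool) : pvStepB st ch = (st.1, st.2.1, false) := by
  simp [pvStepB, hs]

-- one non-space step, in-group: B does exactly A's inner step on the last entry
theorem pvStepB_in (ch : Char) (hs : PySem.Chars.isspace ch = false)
    (d : List Int) (m c : Int) :
    pvStepB (d ++ [m], c, true) ch
      = (d ++ [(pvStepA (c, m) ch).2], (pvStepA (c, m) ch).1, true) := by
  by_cases h1 : ch = '('
  · subst h1; simp [pvStepB, pvStepA, hs, pvUpdLast_append]
  · by_cases h2 : ch = ')'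
    · subst h2; simp [pvStepB, pvStepA, hs, h1]
    · simp [pvStepB, pvStepA, hs, h1, h2]
-- one non-space step, out-of-group: B opens a fresh entry and does A's inner step from (0,0)
theorem pvStepB_out (ch : Char) (hs : PySem.Chars.isspace ch = false)
    (d : List Int) (c0 : Int) :
    pvStepB (d, c0, false) ch
      = (d ++ [(pvStepA ((0 : Int), (0 : Int)) ch).2], (pvStepA ((0 : Int), (0 : Int)) ch).1, true) := by
  by_cases h1 : ch = '('
  · subst h1; simp [pvStepB, pvStepA, hs, pvUpdLast_append]
  · by_cases h2 : ch = ')'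
    · subst h2; simp [pvStepB, pvStepA, hs, h1]
    · simp [pvStepB, pvStepA, hs, h1, h2]
-- the scan invariant, both modes at once
theorem pvMain (cs : List Char) :
    (∀ (d : List Int) (c0 : Int),
       (cs.foldl pvStepB (d, c0, false)).1 = d ++ (pvToks cs).map pvPeak) ∧
    (∀ (d : List Int) (m c : Int),
       (cs.foldl pvStepB (d ++ [m], c, true)).1
         = d ++ [((cs.takeWhile (fun x => !PySem.Chars.isspace x)).foldl pvStepA (c, m)).2]
             ++ (pvToks (cs.dropWhile (fun x => !PySem.Chars.isspace x))).map pvPeak) := by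
  induction cs with
  | nil => constructor <;> intros <;> simp [pvToks]
  | cons ch rest ih =>
    constructor
    · intro d c0
      by_cases hs : PySem.Chars.isspace ch
      · rw [List.foldl_cons, pvStepB_space ch hs]
        simpa [pvToks, hs] using ih.1 d c0
      · have hs' : PySem.Chars.isspace ch = false := by simpa using hs
        rw [List.foldl_cons, pvStepB_out ch hs' d c0, ih.2]
        simp [pvToks, hs, pvPeak]
    · intro d m c
      by_cases hs : PySem.Chars.isspace ch
      · rw [List.foldl_cons, pvStepB_space ch hs, ih.1 (d ++ [m]) c]
        simp [hs, pvToks]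
      · have hs' : PySem.Chars.isspace ch = false := by simpa using hs
        rw [List.foldl_cons, pvStepB_in ch hs' d m c, ih.2]
        simp [hs]

-- A's outer foldl-append is a map
theorem pvFoldl_map {α : Type} (f : α → Int) (gs : List α) : ∀ (acc : List Int),
    gs.foldl (fun depths g => depths ++ [f g]) acc = acc ++ gs.map f := by
  induction gs with
  | nil => intro acc; simp
  | cons g t ih => intro acc; simp [ih]

-- ===== VERDICT (by name: the statement is the Claim_ definition above) =====
theorem get_parentheses_depths_spec : Claim_equal_get_parentheses_depths := by
  intro s _
  show _ = _
  simp only [get_parentheses_depths, get_parentheses_depths_alt]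
  rw [pvFoldl_map (fun (group : String) => (List.foldl pvStepA ((0 : Int), (0 : Int)) group.toList).2) (PySem.Str.split₀ s) []]
  rw [(pvMain s.toList).1 [] 0]
  simp only [List.nil_append]
  rw [← pvSplit_eq_toks]
  rw [← PySem.Str.split₀_map_toList, List.map_map]
  rfl
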